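-- pv_equiv track=rewrite | github.com/KrishothKumar/Python_Practice | find_div.py | mult_5
-- ===== SOURCE A (Python) =====
-- def div_7(num,num2):
--     list=[]
--     for i in range(num,num2+1,1):
--         if (i%7 == 0):
--             list.append(i)
--     return list
--
-- def mult_5(num,num2):
--     ls=[]
--     l= div_7(num,num2)
--     for i in l:
--         if (i%5 == 0):
--             continue
--         else:
--             ls.append(i)
--     return ls
-- ===== SOURCE B (Python) =====
-- def mult_5(num, num2):
--     start = num + (-num) % 7
--     ls = []
--     for i in range(start, num2 + 1, 7):
--         if i % 5 != 0:
--             ls.append(i)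
--     return ls
-- ===== Notes on version B (the rewrite author's own statement) =====
-- stated objective: faster
-- what changed: Instead of scanning every integer in [num, num2] and testing i%7==0 (then a second pass dropping multiples of 5), B computes the first multiple of 7 at or above num and steps by 7, filtering multiples of 5 in the same single pass.
import Mathlib
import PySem

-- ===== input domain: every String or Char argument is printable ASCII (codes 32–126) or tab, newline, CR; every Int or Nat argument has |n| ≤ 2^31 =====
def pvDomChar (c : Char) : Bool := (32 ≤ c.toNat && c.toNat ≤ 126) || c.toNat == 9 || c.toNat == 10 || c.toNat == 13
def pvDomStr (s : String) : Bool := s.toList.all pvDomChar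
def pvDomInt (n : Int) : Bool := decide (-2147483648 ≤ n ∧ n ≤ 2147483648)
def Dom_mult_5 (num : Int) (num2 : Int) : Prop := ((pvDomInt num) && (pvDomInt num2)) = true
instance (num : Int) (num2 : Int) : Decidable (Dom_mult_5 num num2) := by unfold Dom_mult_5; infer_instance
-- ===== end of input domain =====

-- B replaces A's full scan of [num, num2] (testing i%7==0, then a second pass dropping
-- multiples of 5) by stepping through the multiples of 7 directly in one pass.

-- ===== PORT A =====
def div_7 (num : Int) (num2 : Int) : List Int :=
  (PySem.List.pyRange num (num2 + 1) 1).foldl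
    (fun acc i => if PySem.Int.mod i 7 == 0 then acc ++ [i] else acc) []

def mult_5 (num : Int) (num2 : Int) : List Int :=
  (div_7 num num2).foldl
    (fun acc i => if PySem.Int.mod i 5 == 0 then acc else acc ++ [i]) []

-- ===== PORT B =====
def mult_5_alt (num : Int) (num2 : Int) : List Int :=
  let start := num + PySem.Int.mod (-num) 7
  (PySem.List.pyRange start (num2 + 1) 7).foldl
    (fun acc i => if PySem.Int.mod i 5 != 0 then acc ++ [i] else acc) []

-- ===== PRECONDITION & SPEC =====
def Spec_mult_5 (num : Int) (num2 : Int) (out : List Int) : Prop := out = mult_5_alt num num2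
instance (num : Int) (num2 : Int) (out : List Int) : Decidable (Spec_mult_5 num num2 out) := by
  unfold Spec_mult_5; infer_instance

-- ===== CLAIM (what is proved, stated in full; the proofs are below) =====
def Claim_equal_mult_5 : Prop := ∀ (num : Int) (num2 : Int), Dom_mult_5 num num2 → Spec_mult_5 num num2 (mult_5 num num2)

-- ===== LEMMAS AND PROOFS =====

-- 'if p then acc else acc ++ [x]' (A's continue-loop) is a filter by the negated test
theorem foldl_skip_if {α : Type} (p : α → Bool) (l acc : List α) :
    l.foldl (fun acc x => if p x then acc else acc ++ [x]) acc
      = acc ++ l.filter (fun x => !p x) := by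
  induction l generalizing acc with
  | nil => simp
  | cons x xs ih =>
    by_cases h : p x <;> simp [List.foldl_cons, h, ih]

theorem pyRange7_nil (a b : Int) (h : b ≤ a) : PySem.List.pyRange a b 7 = [] := by
  rw [PySem.List.pyRange_of_pos a b (by norm_num)]
  simp [show ¬ a < b by omega]

theorem pyRange7_cons (a b : Int) (h : a < b) :
    PySem.List.pyRange a b 7 = a :: PySem.List.pyRange (a + 7) b 7 := by
  rw [PySem.List.pyRange_of_pos a b (by norm_num),
      PySem.List.pyRange_of_pos (a + 7) b (by norm_num)]
  by_cases h2 : a + 7 < b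
  · have hc : ((b - a + 7 - 1) / 7).toNat = ((b - (a + 7) + 7 - 1) / 7).toNat + 1 := by
      omega
    rw [if_pos h, if_pos h2, hc, List.range_succ_eq_map]
    simp only [List.map_cons, List.map_map, Nat.cast_zero, mul_zero, add_zero]
    congr 1
    apply List.map_congr_left
    intro k _
    simp only [Function.comp]
    push_cast
    ring
  · have hc : ((b - a + 7 - 1) / 7).toNat = 1 := by omega
    rw [if_pos h, if_neg h2, hc]
    simp

-- key lemma: the multiples of 7 in range(a, b) are exactly range(a + (-a) % 7, b, 7)
theorem filter7_eq_step7 (a b : Int) :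
    (PySem.List.pyRange a b 1).filter (fun i => PySem.Int.mod i 7 == 0)
      = PySem.List.pyRange (a + PySem.Int.mod (-a) 7) b 7 := by
  have key : ∀ (n : Nat) (a : Int), (b - a).toNat ≤ n →
      (PySem.List.pyRange a b 1).filter (fun i => PySem.Int.mod i 7 == 0)
        = PySem.List.pyRange (a + PySem.Int.mod (-a) 7) b 7 := by
    intro n
    induction n with
    | zero =>
      intro a ha
      have hba : b ≤ a := by omega
      rw [PySem.List.pyRange_one_eq_nil hba, pyRange7_nil]
      · simp
      · have := Int.emod_nonneg (-a) (by norm_num : (7:Int) ≠ 0)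
        rw [PySem.Int.mod_eq_emod_of_pos (by norm_num)]
        omega
    | succ n ih =>
      intro a ha
      by_cases hba : b ≤ a
      · rw [PySem.List.pyRange_one_eq_nil hba, pyRange7_nil]
        · simp
        · have := Int.emod_nonneg (-a) (by norm_num : (7:Int) ≠ 0)
          rw [PySem.Int.mod_eq_emod_of_pos (by norm_num)]
          omega
      · have hab : a < b := by omega
        rw [PySem.List.pyRange_one_cons hab, List.filter_cons,
            ih (a + 1) (by omega)]
        by_cases hd : (7:Int) ∣ a
        · have hpa : (PySem.Int.mod a 7 == 0) = true := by
            simpa [PySem.Int.mod_eq_zero_iff_dvd] using hd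
          have hs : a + PySem.Int.mod (-a) 7 = a := by
            rw [PySem.Int.mod_eq_emod_of_pos (by norm_num)]
            omega
          have hs' : (a + 1) + PySem.Int.mod (-(a + 1)) 7 = a + 7 := by
            rw [PySem.Int.mod_eq_emod_of_pos (by norm_num)]
            omega
          rw [hpa, if_pos rfl, hs, hs', pyRange7_cons a b hab]
        · have hm : PySem.Int.mod a 7 ≠ 0 := fun h =>
            hd ((PySem.Int.mod_eq_zero_iff_dvd a 7).mp h)
          have hpa : (PySem.Int.mod a 7 == 0) = false := by
            simpa using hm
          have hnd : ¬ (7:Int) ∣ (-a) := by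
            intro h; exact hd (by omega)
          have hs : (a + 1) + PySem.Int.mod (-(a + 1)) 7 = a + PySem.Int.mod (-a) 7 := by
            rw [PySem.Int.mod_eq_emod_of_pos (by norm_num),
                PySem.Int.mod_eq_emod_of_pos (by norm_num)]
            have h1 := Int.emod_nonneg (-a) (by norm_num : (7:Int) ≠ 0)
            have h2 : (-a) % 7 ≠ 0 := by
              intro h; exact hnd (Int.dvd_of_emod_eq_zero h)
            omega
          rw [hpa, if_neg (by simp), hs]
  exact key (b - a).toNat a le_rfl

-- ===== VERDICT (by name: the statement is the Claim_ definition above) =====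
theorem mult_5_spec : Claim_equal_mult_5 := by
  intro num num2 _
  unfold Spec_mult_5 mult_5 mult_5_alt div_7
  rw [PySem.List.foldl_append_if_eq_filter, foldl_skip_if,
      PySem.List.foldl_append_if_eq_filter]
  simp only [List.nil_append, filter7_eq_step7]
  apply List.filter_congr
  intro x _
  simp [bne]
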